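-- pv_equiv track=rewrite | github.com/Azcobu/Advent-of-Code-2021 | 2019/day01/aoc19-1b.py | calc_fuel
-- ===== SOURCE A (Python) =====
-- def calc_fuel(data):
--     total = []
--     for base in data:
--         add = base // 3 - 2
--         total.append(add)
--         while True:
--             add = add // 3 - 2
--             if add > 0:
--                 total.append(add)
--             else:
--                 break
--     return sum(total)
-- ===== SOURCE B (Python) =====
-- def cascade(f):
--     nxt = f // 3 - 2
--     return nxt + cascade(nxt) if nxt > 0 else 0
--
-- def calc_fuel(data):
--     return sum((base // 3 - 2) + cascade(base // 3 - 2) for base in data)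
-- ===== Notes on version B (the rewrite author's own statement) =====
-- stated objective: simpler
-- what changed: Replaced the list-building while-loop (append every cascade step, sum at the end) with a direct recursive cascade function summed per mass with no intermediate list, preserving A's unconditional first term.
import Mathlib
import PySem

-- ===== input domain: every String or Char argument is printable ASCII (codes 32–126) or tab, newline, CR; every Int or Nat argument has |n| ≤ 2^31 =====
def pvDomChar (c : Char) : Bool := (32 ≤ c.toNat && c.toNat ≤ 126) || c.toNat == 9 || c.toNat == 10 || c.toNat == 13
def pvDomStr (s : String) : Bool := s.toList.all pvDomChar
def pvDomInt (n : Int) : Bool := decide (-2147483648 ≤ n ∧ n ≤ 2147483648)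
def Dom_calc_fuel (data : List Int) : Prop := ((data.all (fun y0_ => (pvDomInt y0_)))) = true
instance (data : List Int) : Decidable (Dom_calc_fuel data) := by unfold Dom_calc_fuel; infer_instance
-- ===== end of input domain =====

-- B replaces A's list-building while-loop by a direct recursive cascade summed per mass (no intermediate list); same exact values, objective: simpler.


-- termination helper: one cascade step shrinks toNat when the result is positive
theorem pvStep_lt (a : Int) (h : 0 < PySem.Int.floordiv a 3 - 2) :
    (PySem.Int.floordiv a 3 - 2).toNat < a.toNat := by
  rw [PySem.Int.floordiv_eq_ediv_of_pos (by omega : (0:Int) < 3)] at *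
  omega

-- ===== PORT A =====
-- the 'while True' inner loop: add = add//3-2; append while positive
def fuelLoop (add : Int) (total : List Int) : List Int :=
  let add' := PySem.Int.floordiv add 3 - 2
  if h : add' > 0 then fuelLoop add' (total ++ [add']) else total
termination_by add.toNat
decreasing_by exact pvStep_lt add h

def calc_fuel (data : List Int) : Int :=
  (data.foldl (fun total base =>
      let add := PySem.Int.floordiv base 3 - 2
      fuelLoop add (total ++ [add])) []).sum

-- ===== PORT B =====
def cascade (f : Int) : Int :=
  let nxt := PySem.Int.floordiv f 3 - 2
  if h : nxt > 0 then nxt + cascade nxt else 0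
termination_by f.toNat
decreasing_by exact pvStep_lt f h

def calc_fuel_alt (data : List Int) : Int :=
  (data.map (fun base =>
      let first := PySem.Int.floordiv base 3 - 2
      first + cascade first)).sum

-- ===== PRECONDITION & SPEC =====
def Spec_calc_fuel (data : List Int) (out : Int) : Prop := out = calc_fuel_alt data
instance (data : List Int) (out : Int) : Decidable (Spec_calc_fuel data out) := by unfold Spec_calc_fuel; infer_instance

-- ===== CLAIM (what is proved, stated in full; the proofs are below) =====
def Claim_equal_calc_fuel : Prop := ∀ (data : List Int), Dom_calc_fuel data → Spec_calc_fuel data (calc_fuel data)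

-- ===== LEMMAS AND PROOFS =====
theorem fuelLoop_sum_aux : ∀ (n : Nat) (add : Int) (total : List Int), add.toNat ≤ n →
    (fuelLoop add total).sum = total.sum + cascade add := by
  intro n
  induction n with
  | zero =>
    intro add total hle
    rw [fuelLoop.eq_def, cascade.eq_def]
    simp only [gt_iff_lt]
    split_ifs with h
    · exact absurd (pvStep_lt add h) (by omega)
    · simp
  | succ n ih =>
    intro add total hle
    rw [fuelLoop.eq_def, cascade.eq_def]
    simp only [gt_iff_lt]
    split_ifs with h
    · have hlt := pvStep_lt add h
      rw [ih _ _ (by omega)]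
      simp only [List.sum_append, List.sum_cons, List.sum_nil]
      ring
    · simp

theorem fuelLoop_sum (add : Int) (total : List Int) :
    (fuelLoop add total).sum = total.sum + cascade add :=
  fuelLoop_sum_aux add.toNat add total le_rfl

theorem calc_fuel_fold (data : List Int) (total : List Int) :
    (data.foldl (fun total base =>
        let add := PySem.Int.floordiv base 3 - 2
        fuelLoop add (total ++ [add])) total).sum
      = total.sum + calc_fuel_alt data := by
  induction data generalizing total with
  | nil => simp [calc_fuel_alt]
  | cons b bs ih =>
    simp only [List.foldl_cons]
    rw [ih, fuelLoop_sum]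
    simp only [calc_fuel_alt, List.map_cons, List.sum_cons, List.sum_append, List.sum_nil]
    ring

-- ===== VERDICT (by name: the statement is the Claim_ definition above) =====
theorem calc_fuel_spec : Claim_equal_calc_fuel := by
  intro data _
  show calc_fuel data = calc_fuel_alt data
  unfold calc_fuel
  rw [calc_fuel_fold]
  simp
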